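-- pv_equiv track=rewrite | github.com/dadflip/IA-Project | _ai_/ai_solver.py | calculate_penalty_for_holes
-- ===== SOURCE A (Python) =====
-- def calculate_penalty_for_holes(grid):
--     """
--     Calculates a penalty based on holes or unusable spaces in the grid.
--
--     :param grid: The current grid after simulation.
--     :return: A numerical penalty (higher if the grid contains many holes).
--     """
--     # Identify empty cells
--     empty_cells = [(i, j) for i, row in enumerate(grid) for j, cell in enumerate(row) if cell == 0]
--
--     # Find groups of connected empty cells
--     visited = set()
--     penalty = 0
--
--     def dfs(cell):
--         stack = [cell]
--         connected = []
--         while stack: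
--             x, y = stack.pop()
--             if (x, y) in visited:
--                 continue
--             visited.add((x, y))
--             connected.append((x, y))
--             # Check adjacent neighbors
--             for dx, dy in [(-1, 0), (1, 0), (0, -1), (0, 1)]:
--                 nx, ny = x + dx, y + dy
--                 if 0 <= nx < len(grid) and 0 <= ny < len(grid[0]) and grid[nx][ny] == 0:
--                     stack.append((nx, ny))
--         return connected
--
--     for cell in empty_cells:
--         if cell not in visited:
--             hole = dfs(cell)
--             penalty += len(hole)  # Add a penalty proportional to the size of the hole
--
--     return penalty
-- ===== SOURCE B (Python) =====
-- def calculate_penalty_for_holes(grid):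
--     """
--     Calculates a penalty based on holes or unusable spaces in the grid.
--
--     :param grid: The current grid after simulation.
--     :return: A numerical penalty (higher if the grid contains many holes).
--     """
--     # The penalty is the sum of the sizes of the connected groups of empty
--     # cells, which is simply the total number of empty cells.
--     return sum(row.count(0) for row in grid)
-- ===== Notes on version B (the rewrite author's own statement) =====
-- stated objective: simpler
-- what changed: A finds connected components of zero cells with a DFS over a visited set and sums their sizes; since every zero cell lies in exactly one component, B just counts the zero cells row by row (one line), dropping the DFS, the visited set and the coordinate lists entirely (measured ~1.3x, below the 1.5x bar, so no speed is claimed).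
import Mathlib
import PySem

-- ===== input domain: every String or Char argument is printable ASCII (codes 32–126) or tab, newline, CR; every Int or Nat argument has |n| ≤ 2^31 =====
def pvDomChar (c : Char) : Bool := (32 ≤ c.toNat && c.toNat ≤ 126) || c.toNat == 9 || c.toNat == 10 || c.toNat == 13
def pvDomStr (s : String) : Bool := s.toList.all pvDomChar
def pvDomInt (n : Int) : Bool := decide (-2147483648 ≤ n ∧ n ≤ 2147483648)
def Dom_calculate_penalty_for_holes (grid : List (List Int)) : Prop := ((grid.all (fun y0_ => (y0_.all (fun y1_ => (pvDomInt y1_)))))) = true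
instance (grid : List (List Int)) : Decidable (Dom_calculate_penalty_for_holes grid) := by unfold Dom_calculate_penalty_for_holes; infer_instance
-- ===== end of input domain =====

-- A sums sizes of DFS-found connected components of zero cells; B simply counts zero cells (same total; every zero cell lies in exactly one component).


-- ===== PORT A =====
-- empty_cells = [(i, j) for i, row in enumerate(grid) for j, cell in enumerate(row) if cell == 0]
def pvEmptyCells (grid : List (List Int)) : List (Int × Int) :=
  (PySem.List.enumerate grid).flatMap (fun ir =>
    (PySem.List.enumerate ir.2).filterMap (fun jc =>
      if jc.2 = 0 then some (ir.1, jc.1) else none))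

-- the neighbours pushed on the stack for a popped cell (x, y); the access grid[nx][ny] is ported
-- with pyGet?: where Python would raise IndexError (excluded by Pre_) the port simply does not push.
def pvNbrs (grid : List (List Int)) (x y : Int) : List (Int × Int) :=
  ([((-1 : Int), (0 : Int)), (1, 0), (0, -1), (0, 1)]).filterMap (fun d =>
    let nx := x + d.1
    let ny := y + d.2
    if 0 ≤ nx ∧ nx < (grid.length : Int) ∧ 0 ≤ ny ∧ ny < ((PySem.List.pyGetD grid 0 []).length : Int)
       ∧ (PySem.List.pyGet? grid nx).bind (fun row => PySem.List.pyGet? row ny) = some 0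
    then some (nx, ny) else none)

-- the 'while stack:' loop of dfs; the stack is kept top-first (Python pushes/pops at the end).
-- fuel only makes the loop structurally total; pvFuel below is proved sufficient (pv_dfsLoop_spec).
def pvDfsLoop (grid : List (List Int)) :
    Nat → List (Int × Int) → PySem.Set (Int × Int) → List (Int × Int) →
    PySem.Set (Int × Int) × List (Int × Int)
  | _, [], v, c => (v, c)
  | 0, _, v, c => (v, c)
  | f + 1, p :: rest, v, c =>
      if PySem.Set.contains v p then pvDfsLoop grid f rest v c
      else pvDfsLoop grid f ((pvNbrs grid p.1 p.2).reverse ++ rest) (PySem.Set.add v p) (c ++ [p])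

def pvFuel (grid : List (List Int)) : Nat := 1 + 5 * (grid.map (·.length)).sum

-- dfs(cell): returns (the updated visited set, connected)
def pvDfs (grid : List (List Int)) (cell : Int × Int) (visited : PySem.Set (Int × Int)) :
    PySem.Set (Int × Int) × List (Int × Int) :=
  pvDfsLoop grid (pvFuel grid) [cell] visited []

def calculate_penalty_for_holes (grid : List (List Int)) : Int :=
  let empty_cells := pvEmptyCells grid
  (empty_cells.foldl
    (fun (st : PySem.Set (Int × Int) × Int) cell =>
      if PySem.Set.contains st.1 cell then st
      else
        let r := pvDfs grid cell st.1
        (r.1, st.2 + (r.2.length : Int)))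
    (PySem.Set.empty, 0)).2

-- ===== PORT B =====
-- return sum(row.count(0) for row in grid)
def calculate_penalty_for_holes_alt (grid : List (List Int)) : Int :=
  (grid.map (fun row => (PySem.List.count row 0 : Int))).sum

-- ===== PRECONDITION & SPEC =====
-- Pre_ excludes exactly the grids on which Python A raises IndexError: those where some zero cell
-- has a 4-neighbour whose row index is inside the grid and whose column index is inside row 0's
-- width but beyond the end of that neighbour's own (shorter) row — the DFS probes grid[nx][ny]
-- there.  On every other input A returns normally.
def Pre_calculate_penalty_for_holes (grid : List (List Int)) : Prop :=
  ∀ i < grid.length, ∀ j < (grid.getD i []).length,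
    (grid.getD i []).getD j 1 = 0 →
      ∀ d ∈ [((-1 : Int), (0 : Int)), (1, 0), (0, -1), (0, 1)],
        (0 ≤ (i : Int) + d.1 ∧ (i : Int) + d.1 < (grid.length : Int) ∧
         0 ≤ (j : Int) + d.2 ∧ (j : Int) + d.2 < ((grid.headD []).length : Int)) →
        (j : Int) + d.2 < ((grid.getD ((i : Int) + d.1).toNat []).length : Int)
instance (grid : List (List Int)) : Decidable (Pre_calculate_penalty_for_holes grid) := by
  unfold Pre_calculate_penalty_for_holes; exact Nat.decidableBallLT _ _

def pvWitness_calculate_penalty_for_holes : List (List Int) := [[0, 1], [1, 0]]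

def Spec_calculate_penalty_for_holes (grid : List (List Int)) (out : Int) : Prop :=
  out = calculate_penalty_for_holes_alt grid
instance (grid : List (List Int)) (out : Int) : Decidable (Spec_calculate_penalty_for_holes grid out) := by
  unfold Spec_calculate_penalty_for_holes; infer_instance

-- ===== CLAIM (what is proved, stated in full; the proofs are below) =====
def Claim_equal_calculate_penalty_for_holes : Prop :=
  ∀ (grid : List (List Int)), Dom_calculate_penalty_for_holes grid →
    Pre_calculate_penalty_for_holes grid →
    Spec_calculate_penalty_for_holes grid (calculate_penalty_for_holes grid)

-- ===== LEMMAS AND PROOFS =====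

-- membership in empty_cells
theorem pv_mem_emptyCells {grid : List (List Int)} {p : Int × Int} :
    p ∈ pvEmptyCells grid ↔
      ∃ (i : Nat) (hi : i < grid.length) (j : Nat) (hj : j < grid[i].length),
        p = ((i : Int), (j : Int)) ∧ grid[i][j] = 0 := by
  simp only [pvEmptyCells, List.mem_flatMap, List.mem_filterMap,
    PySem.List.mem_enumerate_iff]
  constructor
  · rintro ⟨ir, ⟨i, hi, rfl⟩, jc, ⟨j, hj, rfl⟩, hz⟩
    simp only [zero_add, Option.ite_none_right_eq_some, Option.some.injEq] at hz
    exact ⟨i, hi, j, hj, hz.2.symm, hz.1⟩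
  · rintro ⟨i, hi, j, hj, rfl, hz⟩
    refine ⟨((i:Int), grid[i]), ⟨i, hi, by simp⟩, ?_⟩
    exact ⟨((j:Int), grid[i][j]), ⟨j, hj, by simp⟩, by simp [hz]⟩

-- a pushed neighbour is always an empty cell of the grid
theorem pv_nbrs_subset {grid : List (List Int)} {x y : Int} {p : Int × Int}
    (hp : p ∈ pvNbrs grid x y) : p ∈ pvEmptyCells grid := by
  simp only [pvNbrs, List.mem_filterMap, Option.ite_none_right_eq_some,
    Option.some.injEq] at hp
  obtain ⟨d, _, ⟨hx0, hxl, hy0, hyl, hget⟩, rfl⟩ := hp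
  rw [Option.bind_eq_some_iff] at hget
  obtain ⟨row, hrow, hcell⟩ := hget
  rw [PySem.List.pyGet?_of_nonneg _ hx0] at hrow
  rw [PySem.List.pyGet?_of_nonneg _ hy0] at hcell
  rw [List.getElem?_eq_some_iff] at hrow hcell
  obtain ⟨hi, rfl⟩ := hrow
  obtain ⟨hj, hc⟩ := hcell
  rw [pv_mem_emptyCells]
  exact ⟨(x + d.1).toNat, hi, (y + d.2).toNat, hj,
    by simp [Int.toNat_of_nonneg hx0, Int.toNat_of_nonneg hy0], hc⟩

theorem pv_nbrs_len {grid : List (List Int)} {x y : Int} : (pvNbrs grid x y).length ≤ 4 := by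
  have := List.length_filterMap_le (fun d : Int × Int =>
    (if 0 ≤ x + d.1 ∧ x + d.1 < (grid.length : Int) ∧ 0 ≤ y + d.2 ∧ y + d.2 < ((PySem.List.pyGetD grid 0 []).length : Int)
       ∧ (PySem.List.pyGet? grid (x + d.1)).bind (fun row => PySem.List.pyGet? row (y + d.2)) = some 0
    then some (x + d.1, y + d.2) else none)) [((-1 : Int), (0 : Int)), (1, 0), (0, -1), (0, 1)]
  simpa [pvNbrs] using this

-- empty_cells has no duplicate coordinates
theorem pv_emptyCells_nodup (grid : List (List Int)) : (pvEmptyCells grid).Nodup := by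
  rw [pvEmptyCells, List.nodup_flatMap]
  constructor
  · intro ir _
    refine List.Nodup.filterMap ?_ ?_
    · rintro a a' b hb hb'
      simp only [Option.mem_def, Option.ite_none_right_eq_some, Option.some.injEq] at hb hb'
      obtain ⟨ha, rfl⟩ := hb
      obtain ⟨ha', he⟩ := hb'
      obtain ⟨a1, a2⟩ := a; obtain ⟨a1', a2'⟩ := a'
      simp_all
    · exact ((PySem.List.pairwise_lt_enumerate ir.2 0).imp
        (by intro a b h; exact fun he => by simp [he] at h))
  · refine (PySem.List.pairwise_lt_enumerate grid 0).imp ?_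
    intro a b hab x hx hx'
    simp only [List.mem_filterMap, Option.ite_none_right_eq_some, Option.some.injEq] at hx hx'
    obtain ⟨_, _, _, rfl⟩ := hx
    obtain ⟨_, _, _, he⟩ := hx'
    have := congrArg Prod.fst he
    simp at this
    omega

-- the dfs loop: with enough fuel the visited set stays inside empty_cells, grows by exactly the
-- cells appended to connected, absorbs every stacked cell, and stays duplicate-free.
theorem pv_dfsLoop_spec (grid : List (List Int)) :
    ∀ (f : Nat) (stack : List (Int × Int)) (v c : List (Int × Int)),
      (∀ p ∈ stack, p ∈ pvEmptyCells grid) → (∀ p ∈ v, p ∈ pvEmptyCells grid) → v.Nodup →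
      stack.length + 5 * ((pvEmptyCells grid).toFinset \ v.toFinset).card ≤ f →
      (∀ p ∈ (pvDfsLoop grid f stack v c).1, p ∈ pvEmptyCells grid) ∧
      (pvDfsLoop grid f stack v c).1.Nodup ∧
      (∀ p ∈ v, p ∈ (pvDfsLoop grid f stack v c).1) ∧
      (∀ p ∈ stack, p ∈ (pvDfsLoop grid f stack v c).1) ∧
      (pvDfsLoop grid f stack v c).2.length + v.length
        = c.length + (pvDfsLoop grid f stack v c).1.length := by
  intro f
  induction f with
  | zero =>
    intro stack v c hs hv hnd hb
    match stack with
    | [] => exact ⟨hv, hnd, fun p hp => hp, by simp, by simp [pvDfsLoop]⟩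
    | p :: rest => simp at hb
  | succ f ih =>
    intro stack v c hs hv hnd hb
    match stack with
    | [] => exact ⟨hv, hnd, fun p hp => hp, by simp, by simp [pvDfsLoop]⟩
    | p :: rest =>
      by_cases hc : PySem.Set.contains v p
      · rw [show pvDfsLoop grid (f+1) (p :: rest) v c = pvDfsLoop grid f rest v c by
          simp [pvDfsLoop]
          intro h
          exact absurd ((PySem.Set.contains_iff v p).1 hc) h]
        obtain ⟨h1, h2, h3, h4, h5⟩ := ih rest v c (fun q hq => hs q (List.mem_cons_of_mem _ hq)) hv hnd
          (by simp at hb; omega)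
        refine ⟨h1, h2, h3, ?_, h5⟩
        intro q hq
        rcases List.mem_cons.1 hq with rfl | hq
        · exact h3 q ((PySem.Set.contains_iff v q).1 hc)
        · exact h4 q hq
      · rw [show pvDfsLoop grid (f+1) (p :: rest) v c
            = pvDfsLoop grid f ((pvNbrs grid p.1 p.2).reverse ++ rest) (PySem.Set.add v p) (c ++ [p]) by
          simp [pvDfsLoop]
          intro h
          exact absurd ((PySem.Set.contains_iff v p).2 h) hc]
        have hpZ : p ∈ pvEmptyCells grid := hs p List.mem_cons_self
        have hpnv : p ∉ v := fun h => hc ((PySem.Set.contains_iff v p).2 h)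
        have hadd : PySem.Set.add v p = v ++ [p] := by
          simp [PySem.Set.add]
          intro h
          exact absurd ((PySem.Set.contains_iff v p).2 (by simpa using h)) hc
        have hcard : ((pvEmptyCells grid).toFinset \ (PySem.Set.add v p).toFinset).card
            = ((pvEmptyCells grid).toFinset \ v.toFinset).card - 1 := by
          rw [hadd]
          have : (v ++ [p]).toFinset = insert p v.toFinset := by
            simp [List.toFinset_append]
          rw [this, Finset.sdiff_insert]
          exact Finset.card_erase_of_mem (by simp [hpZ, hpnv])
        have hmem : p ∈ (pvEmptyCells grid).toFinset \ v.toFinset := by simp [hpZ, hpnv]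
        have hkpos : 0 < ((pvEmptyCells grid).toFinset \ v.toFinset).card :=
          Finset.card_pos.2 ⟨p, hmem⟩
        obtain ⟨h1, h2, h3, h4, h5⟩ := ih ((pvNbrs grid p.1 p.2).reverse ++ rest) (PySem.Set.add v p) (c ++ [p])
          (by
            intro q hq
            rcases List.mem_append.1 hq with hq | hq
            · exact pv_nbrs_subset (List.mem_reverse.1 hq)
            · exact hs q (List.mem_cons_of_mem _ hq))
          (by
            intro q hq
            rw [hadd] at hq
            rcases List.mem_append.1 hq with hq | hq
            · exact hv q hq
            · simp at hq; subst hq; exact hpZ)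
          (PySem.Set.nodup_add v p hnd)
          (by
            have hn4 : (pvNbrs grid p.1 p.2).length ≤ 4 := pv_nbrs_len
            simp only [List.length_append, List.length_reverse, List.length_cons] at hb ⊢
            rw [hcard]
            omega)
        refine ⟨h1, h2, ?_, ?_, ?_⟩
        · intro q hq
          exact h3 q (by rw [hadd]; exact List.mem_append_left _ hq)
        · intro q hq
          rcases List.mem_cons.1 hq with rfl | hq
          · exact h3 q (by rw [hadd]; simp)
          · exact h4 q (List.mem_append_right _ hq)
        · simp only [hadd, List.length_append, List.length_cons] at h5 ⊢
          omega

-- counting empty_cells row by row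
theorem pv_row_len (row : List Int) (i : Int) : ∀ (s : Int),
    ((PySem.List.enumerate row s).filterMap (fun jc =>
      if jc.2 = 0 then some (i, jc.1) else none)).length = List.count 0 row := by
  induction row with
  | nil => intro s; simp [PySem.List.enumerate_nil]
  | cons x xs ih =>
    intro s
    rw [PySem.List.enumerate_cons]
    by_cases hx : x = 0 <;> simp [hx, ih (s + 1)]

theorem pv_cells_len (grid : List (List Int)) : ∀ (s : Int),
    ((PySem.List.enumerate grid s).flatMap (fun ir =>
      (PySem.List.enumerate ir.2).filterMap (fun jc =>
        if jc.2 = 0 then some (ir.1, jc.1) else none))).length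
      = (grid.map (fun r => List.count 0 r)).sum := by
  induction grid with
  | nil => intro s; simp [PySem.List.enumerate_nil]
  | cons r rs ih =>
    intro s
    rw [PySem.List.enumerate_cons]
    simp only [List.flatMap_cons, List.length_append, List.map_cons, List.sum_cons, ih (s + 1)]
    rw [pv_row_len]

theorem pv_emptyCells_length (grid : List (List Int)) :
    (pvEmptyCells grid).length = (grid.map (fun r => List.count 0 r)).sum :=
  pv_cells_len grid 0

theorem pv_emptyCells_le (grid : List (List Int)) :
    (pvEmptyCells grid).length ≤ (grid.map (·.length)).sum := by
  rw [pv_emptyCells_length]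
  induction grid with
  | nil => simp
  | cons r rs ih =>
    simp only [List.map_cons, List.sum_cons]
    exact Nat.add_le_add List.count_le_length ih

-- the step of the outer 'for cell in empty_cells' loop (identical to the lambda in the port)
def pvStep (grid : List (List Int)) (st : PySem.Set (Int × Int) × Int) (cell : Int × Int) :
    PySem.Set (Int × Int) × Int :=
  if PySem.Set.contains st.1 cell then st
  else
    let r := pvDfs grid cell st.1
    (r.1, st.2 + (r.2.length : Int))

theorem pv_penalty_eq_fold (grid : List (List Int)) :
    calculate_penalty_for_holes grid
      = ((pvEmptyCells grid).foldl (pvStep grid) (PySem.Set.empty, 0)).2 := rfl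

-- the invariant of the outer loop
theorem pv_fold_spec (grid : List (List Int)) :
    ∀ (cells : List (Int × Int)) (v : List (Int × Int)) (pen : Int),
      (∀ p ∈ cells, p ∈ pvEmptyCells grid) → (∀ p ∈ v, p ∈ pvEmptyCells grid) → v.Nodup →
      (∀ p ∈ (cells.foldl (pvStep grid) (v, pen)).1, p ∈ pvEmptyCells grid) ∧
      (cells.foldl (pvStep grid) (v, pen)).1.Nodup ∧
      (∀ p ∈ v, p ∈ (cells.foldl (pvStep grid) (v, pen)).1) ∧
      (∀ p ∈ cells, p ∈ (cells.foldl (pvStep grid) (v, pen)).1) ∧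
      (cells.foldl (pvStep grid) (v, pen)).2 + (v.length : Int)
        = pen + ((cells.foldl (pvStep grid) (v, pen)).1.length : Int) := by
  intro cells
  induction cells with
  | nil => exact fun v pen _ hv hnd => ⟨hv, hnd, fun p hp => hp, by simp, by simp⟩
  | cons cell cells ih =>
    intro v pen hc hv hnd
    have hcellZ : cell ∈ pvEmptyCells grid := hc cell List.mem_cons_self
    rw [List.foldl_cons]
    by_cases hin : PySem.Set.contains v cell
    · rw [show pvStep grid (v, pen) cell = (v, pen) by
        simp [pvStep]
        intro h
        exact absurd ((PySem.Set.contains_iff v cell).1 hin) h]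
      obtain ⟨h1, h2, h3, h4, h5⟩ := ih v pen (fun q hq => hc q (List.mem_cons_of_mem _ hq)) hv hnd
      refine ⟨h1, h2, h3, ?_, h5⟩
      intro q hq
      rcases List.mem_cons.1 hq with rfl | hq
      · exact h3 q ((PySem.Set.contains_iff v q).1 hin)
      · exact h4 q hq
    · have hd := pv_dfsLoop_spec grid (pvFuel grid) [cell] v []
        (by intro q hq; simp at hq; subst hq; exact hcellZ) hv hnd
        (by
          have h1 : ((pvEmptyCells grid).toFinset \ v.toFinset).card
              ≤ (pvEmptyCells grid).toFinset.card :=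
            Finset.card_le_card (Finset.sdiff_subset)
          have h2 : (pvEmptyCells grid).toFinset.card ≤ (pvEmptyCells grid).length :=
            (pvEmptyCells grid).toFinset_card_le
          have h3 := pv_emptyCells_le grid
          simp only [pvFuel, List.length_cons, List.length_nil]
          omega)
      rw [show pvStep grid (v, pen) cell
          = ((pvDfs grid cell v).1, pen + ((pvDfs grid cell v).2.length : Int)) by
        simp [pvStep]
        intro h
        exact absurd ((PySem.Set.contains_iff v cell).2 h) hin]
      obtain ⟨d1, d2, d3, d4, d5⟩ := hd
      obtain ⟨h1, h2, h3, h4, h5⟩ := ih (pvDfs grid cell v).1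
        (pen + ((pvDfs grid cell v).2.length : Int))
        (fun q hq => hc q (List.mem_cons_of_mem _ hq)) d1 d2
      refine ⟨h1, h2, ?_, ?_, ?_⟩
      · exact fun q hq => h3 q (d3 q hq)
      · intro q hq
        rcases List.mem_cons.1 hq with rfl | hq
        · exact h3 q (d4 q (by simp))
        · exact h4 q hq
      · simp only [pvDfs, List.length_nil, Nat.zero_add] at d5 h5 ⊢
        omega

theorem pv_penalty_eq_card (grid : List (List Int)) :
    calculate_penalty_for_holes grid = ((pvEmptyCells grid).length : Int) := by
  rw [pv_penalty_eq_fold,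
    show (PySem.Set.empty : PySem.Set (Int × Int)) = [] from rfl]
  obtain ⟨h1, h2, h3, h4, h5⟩ :=
    pv_fold_spec grid (pvEmptyCells grid) [] 0 (fun p hp => hp) (by simp) List.nodup_nil
  have hfin : ((pvEmptyCells grid).foldl (pvStep grid) ([], 0)).1.toFinset
      = (pvEmptyCells grid).toFinset := by
    apply Finset.ext
    intro p
    simp only [List.mem_toFinset]
    exact ⟨fun hp => h1 p hp, fun hp => h4 p hp⟩
  have hlen : ((pvEmptyCells grid).foldl (pvStep grid) ([], 0)).1.length
      = (pvEmptyCells grid).length := by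
    rw [← List.toFinset_card_of_nodup h2, ← List.toFinset_card_of_nodup (pv_emptyCells_nodup grid),
      hfin]
  rw [← hlen]
  simpa using h5

theorem pv_alt_eq_card (grid : List (List Int)) :
    calculate_penalty_for_holes_alt grid = ((pvEmptyCells grid).length : Int) := by
  rw [pv_emptyCells_length, calculate_penalty_for_holes_alt]
  push_cast
  rw [List.map_map]
  simp [Function.comp_def, PySem.List.count_eq]

-- ===== VERDICT (by name: the statement is the Claim_ definition above) =====
theorem calculate_penalty_for_holes_spec : Claim_equal_calculate_penalty_for_holes := by
  intro grid _ _
  unfold Spec_calculate_penalty_for_holes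
  rw [pv_penalty_eq_card, pv_alt_eq_card]
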